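-- pv_equiv track=rewrite | github.com/Madhav1223/COA_Lab | shifter.py | arithematic_shift_right
-- ===== SOURCE A (Python) =====
-- def arithematic_shift_right(a):
--     tmp =" "
--     out_var = a[len(a)-1]
--     for i in range(len(a)-1,0,-1):
--          tmp+=a[i-1]
--     tmp+=a[0]
--     a=tmp[::-1].strip()
--     return a,out_var
-- ===== SOURCE B (Python) =====
-- def arithematic_shift_right(a):
--     # closed form: A's loop builds reversed(a[:-1]) then reverses back
--     return (a[0] + a[:-1]).strip(), a[-1]
-- ===== Notes on version B (the rewrite author's own statement) =====
-- stated objective: faster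
-- what changed: Replaces the reverse-and-reassemble loop (sentinel space, character-by-character concatenation, final reversal) by the single closed-form slice expression (a[0] + a[:-1]).strip(), a[-1].
import Mathlib
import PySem

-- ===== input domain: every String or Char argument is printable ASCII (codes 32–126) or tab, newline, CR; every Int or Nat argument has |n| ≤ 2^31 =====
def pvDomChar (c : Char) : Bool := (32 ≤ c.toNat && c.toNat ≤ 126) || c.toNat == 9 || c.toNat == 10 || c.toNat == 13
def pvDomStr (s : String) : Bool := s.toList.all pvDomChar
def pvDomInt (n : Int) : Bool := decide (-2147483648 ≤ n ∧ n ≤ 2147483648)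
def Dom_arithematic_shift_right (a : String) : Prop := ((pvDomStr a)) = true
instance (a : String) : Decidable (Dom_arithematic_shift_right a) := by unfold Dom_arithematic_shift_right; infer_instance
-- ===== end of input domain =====

-- B replaces A's reverse-and-reassemble loop (sentinel space + final reversal) by the
-- closed-form expression (a[0] + a[:-1]).strip(), a[-1] — simpler, no loop.


-- ===== PORT A =====
def arithematic_shift_right (a : String) : String × String :=
  let cs := a.toList
  let out_var : List Char := [PySem.List.pyGetD cs ((cs.length : Int) - 1) ' ']
  let tmp : List Char :=
    (PySem.List.pyRange ((cs.length : Int) - 1) 0 (-1)).foldl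
      (fun t i => t ++ [PySem.List.pyGetD cs (i - 1) ' ']) [' ']
  let tmp2 := tmp ++ [PySem.List.pyGetD cs 0 ' ']
  let res := PySem.Chars.strip tmp2.reverse      -- tmp[::-1].strip()
  (String.ofList res, String.ofList out_var)

-- ===== PORT B =====
def arithematic_shift_right_alt (a : String) : String × String :=
  let cs := a.toList
  let res := PySem.Chars.strip
      (PySem.List.pyGetD cs 0 ' ' :: PySem.List.slice cs none (some (-1)))  -- (a[0] + a[:-1]).strip()
  (String.ofList res, String.ofList [PySem.List.pyGetD cs (-1) ' '])               -- a[-1]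

-- ===== PRECONDITION & SPEC =====
-- A (and B) raise IndexError on the empty string: Pre_ excludes exactly a = "".
def Pre_arithematic_shift_right (a : String) : Prop := a.toList ≠ []
instance (a : String) : Decidable (Pre_arithematic_shift_right a) := by unfold Pre_arithematic_shift_right; infer_instance
def pvWitness_arithematic_shift_right : String := "1011"

def Spec_arithematic_shift_right (a : String) (out : String × String) : Prop := out = arithematic_shift_right_alt a
instance (a : String) (out : String × String) : Decidable (Spec_arithematic_shift_right a out) := by unfold Spec_arithematic_shift_right; infer_instance

-- ===== CLAIM (what is proved, stated in full; the proofs are below) =====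
def Claim_equal_arithematic_shift_right : Prop := ∀ (a : String), Dom_arithematic_shift_right a → Pre_arithematic_shift_right a → Spec_arithematic_shift_right a (arithematic_shift_right a)

-- ===== LEMMAS AND PROOFS =====

-- range(n+1, 0, -1) = (n+1) :: range(n, 0, -1)
lemma pyRange_neg_one_cons (n : Nat) :
    PySem.List.pyRange ((n + 1 : Nat) : Int) 0 (-1)
      = ((n + 1 : Nat) : Int) :: PySem.List.pyRange (n : Int) 0 (-1) := by
  rcases Nat.eq_zero_or_pos n with h | h
  · subst h; decide
  · simp only [PySem.List.pyRange]
    norm_num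
    rw [if_pos (by exact_mod_cast h)]
    simp only [List.range_succ_eq_map, List.map_cons, List.map_map]
    norm_num

-- the loop of A appends the first n characters of cs in reverse order
lemma loopA (cs : List Char) (n : Nat) (hn : n ≤ cs.length) (acc : List Char) :
    (PySem.List.pyRange (n : Int) 0 (-1)).foldl
      (fun t i => t ++ [PySem.List.pyGetD cs (i - 1) ' ']) acc
      = acc ++ (cs.take n).reverse := by
  induction n generalizing acc with
  | zero => simp [PySem.List.pyRange]
  | succ m ih =>
    rw [pyRange_neg_one_cons, List.foldl_cons]
    have hidx : ((m + 1 : Nat) : Int) - 1 = ((m : Nat) : Int) := by push_cast; ring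
    rw [hidx, PySem.List.pyGetD_natCast]
    rw [ih (by omega)]
    have hm : m < cs.length := by omega
    rw [List.getD_eq_getElem cs ' ' hm, List.take_add_one, List.getElem?_eq_getElem hm,
      List.reverse_append]
    simp

lemma strip_append_space (x : List Char) :
    PySem.Chars.strip (x ++ [' ']) = PySem.Chars.strip x := by
  unfold PySem.Chars.strip PySem.Chars.lstrip PySem.Chars.rstrip
  rw [List.dropWhile_append]
  by_cases h : (List.dropWhile PySem.Chars.isspace x).isEmpty
  · rw [if_pos h]
    have hx : List.dropWhile PySem.Chars.isspace x = [] := by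
      simpa [List.isEmpty_iff] using h
    rw [hx]
    decide
  · rw [if_neg h]
    rw [List.reverse_append]
    have hsp : PySem.Chars.isspace ' ' = true := by decide
    simp only [List.reverse_singleton, List.singleton_append, List.dropWhile_cons, hsp,
      if_true]

-- ===== VERDICT (by name: the statement is the Claim_ definition above) =====
theorem arithematic_shift_right_spec : Claim_equal_arithematic_shift_right := by
  intro a _ hpre
  unfold Spec_arithematic_shift_right arithematic_shift_right arithematic_shift_right_alt
  set cs := a.toList with hcs
  have hne : cs ≠ [] := hpre
  have hlen : 1 ≤ cs.length := List.length_pos_iff.mpr hne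
  simp only []
  -- rewrite the loop
  have hcast : ((cs.length : Int) - 1) = ((cs.length - 1 : Nat) : Int) := by omega
  rw [hcast, loopA cs (cs.length - 1) (by omega)]
  -- compute the pieces
  have h0 : PySem.List.pyGetD cs 0 ' ' = cs.getD 0 ' ' := by
    simpa using PySem.List.pyGetD_natCast cs 0 ' '
  have hlast : PySem.List.pyGetD cs ((cs.length - 1 : Nat) : Int) ' ' = cs.getD (cs.length - 1) ' ' :=
    PySem.List.pyGetD_natCast cs (cs.length - 1) ' '
  have hneg1 : PySem.List.pyGetD cs (-1) ' ' = cs.getLast hne := PySem.List.pyGetD_neg_one cs ' ' hne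
  have hlast' : cs.getD (cs.length - 1) ' ' = cs.getLast hne := by
    have h : cs.length - 1 < cs.length := by omega
    rw [List.getD_eq_getElem cs ' ' h, List.getLast_eq_getElem]
  rw [hlast, hlast', hneg1]
  have hslice : PySem.List.slice cs none (some (-1)) = cs.dropLast := PySem.List.slice_to_neg_one cs
  rw [hslice]
  have hdl : cs.take (cs.length - 1) = cs.dropLast := (List.dropLast_eq_take (l := cs)).symm
  rw [hdl]
  -- reverse the assembled tmp
  have hrev : (([' '] ++ cs.dropLast.reverse) ++ [PySem.List.pyGetD cs 0 ' ']).reverse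
      = PySem.List.pyGetD cs 0 ' ' :: (cs.dropLast ++ [' ']) := by
    simp
  rw [hrev]
  rw [show PySem.List.pyGetD cs 0 ' ' :: (cs.dropLast ++ [' '])
      = (PySem.List.pyGetD cs 0 ' ' :: cs.dropLast) ++ [' '] from by simp]
  rw [strip_append_space]
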